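-- pv_equiv track=rewrite | github.com/yusaku0324/osakamenesu | osakamenesu/services/api/app/utils/profiles.py | _compute_price_band
-- ===== SOURCE A (Python) =====
-- from typing import Optional, Iterable, Tuple, Any, List
--
-- PRICE_BANDS: list[tuple[str, int, int | None, str]] = [
--     ("under_10k", 0, 10000, "〜1万円"),
--     ("10k_14k", 10000, 14000, "1.0〜1.4万円"),
--     ("14k_18k", 14000, 18000, "1.4〜1.8万円"),
--     ("18k_22k", 18000, 22000, "1.8〜2.2万円"),
--     ("22k_plus", 22000, None, "2.2万円以上"),
-- ]
--
-- def _compute_price_band(min_price: Optional[int], max_price: Optional[int]) -> tuple[str, str]: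
--     if min_price is None and max_price is None:
--         return "unknown", "価格未設定"
--     # prefer min price for banding; fall back to max if min missing
--     base = min_price if (min_price is not None and min_price > 0) else max_price or 0
--     for key, lower, upper, label in PRICE_BANDS:
--         if upper is None and base >= lower:
--             return key, label
--         if lower <= base < (upper or lower):
--             return key, label
--     return PRICE_BANDS[0][0], PRICE_BANDS[0][3]
-- ===== SOURCE B (Python) =====
-- from typing import Optional
--
-- PRICE_BANDS: list[tuple[str, int, int | None, str]] = [
--     ("under_10k", 0, 10000, "〜1万円"),
--     ("10k_14k", 10000, 14000, "1.0〜1.4万円"),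
--     ("14k_18k", 14000, 18000, "1.4〜1.8万円"),
--     ("18k_22k", 18000, 22000, "1.8〜2.2万円"),
--     ("22k_plus", 22000, None, "2.2万円以上"),
-- ]
--
-- _THRESHOLDS = [10000, 14000, 18000, 22000]
--
-- def _bisect_right(a: list, x: int) -> int:
--     lo, hi = 0, len(a)
--     while lo < hi:
--         mid = (lo + hi) // 2
--         if x < a[mid]:
--             hi = mid
--         else:
--             lo = mid + 1
--     return lo
--
-- def _compute_price_band(min_price: Optional[int], max_price: Optional[int]) -> tuple[str, str]:
--     if min_price is None and max_price is None:
--         return "unknown", "価格未設定"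
--     base = min_price if (min_price is not None and min_price > 0) else max_price or 0
--     idx = _bisect_right(_THRESHOLDS, base)
--     band = PRICE_BANDS[idx]
--     return band[0], band[3]
-- ===== Notes on version B (the rewrite author's own statement) =====
-- stated objective: idiomatic
-- what changed: Replaces the linear scan over the band table (with its None-upper special case and '(upper or lower)' fallback) by a binary search (bisect_right) over the four thresholds followed by direct indexing into PRICE_BANDS.
import Mathlib
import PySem

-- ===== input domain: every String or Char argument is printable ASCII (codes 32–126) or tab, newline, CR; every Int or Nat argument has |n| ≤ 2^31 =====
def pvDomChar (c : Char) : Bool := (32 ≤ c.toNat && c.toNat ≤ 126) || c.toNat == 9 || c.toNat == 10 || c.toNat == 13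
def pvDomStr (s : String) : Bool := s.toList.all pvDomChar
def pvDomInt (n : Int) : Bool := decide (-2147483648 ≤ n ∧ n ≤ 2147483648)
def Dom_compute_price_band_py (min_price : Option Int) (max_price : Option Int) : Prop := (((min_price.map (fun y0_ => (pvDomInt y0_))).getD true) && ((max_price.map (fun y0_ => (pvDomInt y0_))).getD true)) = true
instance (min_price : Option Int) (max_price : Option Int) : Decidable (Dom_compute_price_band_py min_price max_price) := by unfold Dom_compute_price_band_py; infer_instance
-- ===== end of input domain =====

-- B replaces A's linear scan of the band table by a hand-written bisect_right binary
-- search over the four thresholds plus direct indexing into the band list (idiomatic).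


-- ===== PORT A =====
-- PRICE_BANDS table: (key, lower, upper, label)
def pvBands : List (String × Int × Option Int × String) :=
  [("under_10k", 0, some 10000, "〜1万円"),
   ("10k_14k", 10000, some 14000, "1.0〜1.4万円"),
   ("14k_18k", 14000, some 18000, "1.4〜1.8万円"),
   ("18k_22k", 18000, some 22000, "1.8〜2.2万円"),
   ("22k_plus", 22000, none, "2.2万円以上")]

-- Python truthiness fallback `max_price or 0` (None→0, 0→0, v→v)
def pvOrZero : Option Int → Int
  | none => 0
  | some v => if v = 0 then 0 else v

-- Python `(upper or lower)` (None→lower, 0→lower, u→u)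
def pvOrInt (upper : Option Int) (lower : Int) : Int :=
  match upper with
  | none => lower
  | some u => if u = 0 then lower else u

-- the `for key, lower, upper, label in PRICE_BANDS:` loop with its two early returns
def pvScan (base : Int) : List (String × Int × Option Int × String) → Option (String × String)
  | [] => none
  | (key, lower, upper, label) :: rest =>
    if upper = none ∧ base ≥ lower then some (key, label)
    else if lower ≤ base ∧ base < pvOrInt upper lower then some (key, label)
    else pvScan base rest

def compute_price_band_py (min_price : Option Int) (max_price : Option Int) : String × String :=
  if min_price = none ∧ max_price = none then ("unknown", "価格未設定")
  else
    let base :=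
      match min_price with
      | some m => if m > 0 then m else pvOrZero max_price
      | none => pvOrZero max_price
    match pvScan base pvBands with
    | some r => r
    | none => ("under_10k", "〜1万円")

-- ===== PORT B =====
def pvThresholds : List Int := [10000, 14000, 18000, 22000]

-- hand-written _bisect_right from Source B; `a.getD mid 0` is exact: mid < hi ≤ a.length always
def pvBisectRight (a : List Int) (x : Int) (lo hi : Nat) : Nat :=
  if _h : lo < hi then
    let mid := (lo + hi) / 2
    if x < a.getD mid 0 then pvBisectRight a x lo mid
    else pvBisectRight a x (mid + 1) hi
  else lo
termination_by hi - lo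
decreasing_by all_goals omega

def compute_price_band_py_alt (min_price : Option Int) (max_price : Option Int) : String × String :=
  if min_price = none ∧ max_price = none then ("unknown", "価格未設定")
  else
    let base :=
      match min_price with
      | some m => if m > 0 then m else pvOrZero max_price
      | none => pvOrZero max_price
    let idx := pvBisectRight pvThresholds base 0 pvThresholds.length
    let band := pvBands.getD idx ("", 0, none, "")
    (band.1, band.2.2.2)

-- ===== PRECONDITION & SPEC =====
def Spec_compute_price_band_py (min_price : Option Int) (max_price : Option Int) (out : String × String) : Prop := out = compute_price_band_py_alt min_price max_price
instance (min_price : Option Int) (max_price : Option Int) (out : String × String) : Decidable (Spec_compute_price_band_py min_price max_price out) := by unfold Spec_compute_price_band_py; infer_instance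

-- ===== CLAIM (what is proved, stated in full; the proofs are below) =====
def Claim_equal_compute_price_band_py : Prop := ∀ (min_price : Option Int) (max_price : Option Int), Dom_compute_price_band_py min_price max_price → Spec_compute_price_band_py min_price max_price (compute_price_band_py min_price max_price)

-- ===== LEMMAS AND PROOFS =====

lemma pvBisect_eval (x : Int) :
    pvBisectRight pvThresholds x 0 pvThresholds.length =
      if x < 10000 then 0 else if x < 14000 then 1 else if x < 18000 then 2
      else if x < 22000 then 3 else 4 := by
  by_cases h1 : x < 10000
  · simp [pvThresholds, pvBisectRight, show x < 18000 by omega, show x < 14000 by omega, h1]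
  · by_cases h2 : x < 14000
    · simp [pvThresholds, pvBisectRight, show x < 18000 by omega, h1, h2]
    · by_cases h3 : x < 18000
      · simp [pvThresholds, pvBisectRight, h1, h2, h3]
      · by_cases h4 : x < 22000
        · simp [pvThresholds, pvBisectRight, h1, h2, h3, h4]
        · simp [pvThresholds, pvBisectRight, h1, h2, h3, h4]

lemma pvScan_eval (x : Int) :
    pvScan x pvBands =
      if x < 0 then none
      else some (if x < 10000 then ("under_10k", "〜1万円")
            else if x < 14000 then ("10k_14k", "1.0〜1.4万円")
            else if x < 18000 then ("14k_18k", "1.4〜1.8万円")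
            else if x < 22000 then ("18k_22k", "1.8〜2.2万円")
            else ("22k_plus", "2.2万円以上")) := by
  by_cases h0 : x < 0
  · have n1 : ¬ (0:Int) ≤ x := by omega
    have n2 : ¬ (10000:Int) ≤ x := by omega
    have n3 : ¬ (14000:Int) ≤ x := by omega
    have n4 : ¬ (18000:Int) ≤ x := by omega
    have n5 : ¬ (22000:Int) ≤ x := by omega
    simp [pvBands, pvScan, pvOrInt, h0, n1, n2, n3, n4, n5]
  · by_cases h1 : x < 10000
    · have p1 : (0:Int) ≤ x := by omega
      simp [pvBands, pvScan, pvOrInt, h0, h1, p1]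
    · by_cases h2 : x < 14000
      · have p2 : (10000:Int) ≤ x := by omega
        simp [pvBands, pvScan, pvOrInt, h0, h1, h2, p2]
      · by_cases h3 : x < 18000
        · have p3 : (14000:Int) ≤ x := by omega
          simp [pvBands, pvScan, pvOrInt, h0, h1, h2, h3, p3]
        · by_cases h4 : x < 22000
          · have p4 : (18000:Int) ≤ x := by omega
            simp [pvBands, pvScan, pvOrInt, h0, h1, h2, h3, h4, p4]
          · have p5 : (22000:Int) ≤ x := by omega
            simp [pvBands, pvScan, pvOrInt, h0, h1, h2, h3, h4, p5]

lemma band_eq (x : Int) :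
    (match pvScan x pvBands with
      | some r => r
      | none => ("under_10k", "〜1万円")) =
    (let band := pvBands.getD (pvBisectRight pvThresholds x 0 pvThresholds.length) ("", 0, none, "")
     (band.1, band.2.2.2)) := by
  rw [pvScan_eval, pvBisect_eval]
  split_ifs <;> first | rfl | omega

-- ===== VERDICT (by name: the statement is the Claim_ definition above) =====
theorem compute_price_band_py_spec : Claim_equal_compute_price_band_py := by
  intro min_price max_price _
  unfold Spec_compute_price_band_py compute_price_band_py compute_price_band_py_alt
  by_cases h : min_price = none ∧ max_price = none
  · simp [h]
  · simp only [if_neg h]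
    exact band_eq _
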